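-- pv_equiv track=rewrite | github.com/HsiangHung/Code-Challenges | Miscellaneous/get_min_capactity.py | get_min_capactity
-- ===== SOURCE A (Python) =====
-- def get_min_capactity(day, w):
--     if day == 1: return sum(w)
--     if len(w) == day: return max(w)
--
--     min_capacity = sum(w)
--
--     i = 0
--     while i <= len(w) - day:
--         capacity = sum(w[:i+1])
--         min_capacity = min(min_capacity, max(capacity, get_min_capactity(day-1, w[i+1:])))
--         i += 1
--
--     return min_capacity
-- ===== SOURCE B (Python) =====
-- def get_min_capactity(day, w):
--     # Bottom-up DP over (number of days, suffix start) instead of A's recursion over all split points.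
--     n = len(w)
--     if day == 1:
--         return sum(w)
--     if n == day:
--         return max(w)
--     if day > n:
--         return sum(w)
--     # row[j] = best capacity to ship w[j:] in d days; d = 1 row is the suffix sums
--     row = [sum(w[j:]) for j in range(n + 1)]
--     for d in range(2, day + 1):
--         new = []
--         for j in range(n + 1):
--             m = n - j
--             if m == d:
--                 best = max(w[j:])
--             else:
--                 best = sum(w[j:])
--                 for i in range(m - d + 1):
--                     best = min(best, max(sum(w[j:j + i + 1]), row[j + i + 1]))
--             new.append(best)
--         row = new
--     return row[0]
-- ===== Notes on version B (the rewrite author's own statement) =====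
-- stated objective: alternative
-- what changed: Replaced A's exponential recursion over all split points by a bottom-up dynamic-programming table over (number of days, suffix start), computing each row from the previous one.
import Mathlib
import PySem

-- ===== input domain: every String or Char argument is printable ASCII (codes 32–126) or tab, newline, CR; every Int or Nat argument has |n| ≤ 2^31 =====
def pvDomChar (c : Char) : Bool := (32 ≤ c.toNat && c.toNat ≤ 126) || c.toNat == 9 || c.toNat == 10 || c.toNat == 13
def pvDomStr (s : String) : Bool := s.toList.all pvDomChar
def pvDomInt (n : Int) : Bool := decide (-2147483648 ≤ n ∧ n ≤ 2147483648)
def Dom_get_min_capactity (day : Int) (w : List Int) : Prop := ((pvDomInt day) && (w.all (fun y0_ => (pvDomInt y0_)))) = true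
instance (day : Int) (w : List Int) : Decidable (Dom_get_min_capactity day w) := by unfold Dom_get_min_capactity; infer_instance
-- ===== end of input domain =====

-- B replaces A's recursion over all split points by a bottom-up DP table over (days, suffix start).

-- ===== PORT A =====
-- Literal port of A's recursion. The 'if w = []' guard only makes the recursion total:
-- with w = [] the Python loop either does not run (day ≥ 2, same value w.sum) or diverges (day ≤ 0, outside Pre_).
def get_min_capactity (day : Int) (w : List Int) : Int :=
  if day = 1 then w.sum
  else if (w.length : Int) = day then (PySem.List.max? w (fun x => x)).getD 0
  else if hw : w = [] then w.sum
  else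
    (PySem.List.pyRange 0 ((w.length : Int) - day + 1) 1).attach.foldl
      (fun mc i =>
        min mc (max (PySem.List.slice w none (some (i.1 + 1))).sum
                    (get_min_capactity (day - 1) (PySem.List.slice w (some (i.1 + 1)) none))))
      w.sum
termination_by w.length
decreasing_by
  have h0 : (0 : Int) ≤ i.1 := ((PySem.List.mem_pyRange_one).1 i.2).1
  have h1 : (0 : Int) ≤ i.1 + 1 := by omega
  rw [PySem.List.slice_from _ h1]
  have hlen : 0 < w.length := List.length_pos_of_ne_nil hw
  have : 1 ≤ (i.1 + 1).toNat := by omega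
  simp only [List.length_drop]
  omega

-- ===== PORT B =====
-- cell (d, j) of the DP: best capacity to ship w[j:] in d days, given the row for d-1 days
def bCell (w : List Int) (d : Nat) (row : List Int) (j : Nat) : Int :=
  let m := w.length - j
  if m = d then (PySem.List.max? (w.drop j) (fun x => x)).getD 0
  else
    (List.range (((m : Int) - d + 1).toNat)).foldl
      (fun best i => min best (max ((w.drop j).take (i + 1)).sum (row.getD (j + i + 1) 0)))
      ((w.drop j).sum)

def bRow (w : List Int) (d : Nat) (row : List Int) : List Int :=
  (List.range (w.length + 1)).map (bCell w d row)

def get_min_capactity_alt (day : Int) (w : List Int) : Int :=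
  let n := w.length
  if day = 1 then w.sum
  else if (n : Int) = day then (PySem.List.max? w (fun x => x)).getD 0
  else if day > (n : Int) then w.sum
  else
    ((List.range ((day - 1).toNat)).foldl (fun row k => bRow w (k + 2) row)
      ((List.range (n + 1)).map (fun j => (w.drop j).sum))).getD 0 0

-- ===== PRECONDITION & SPEC =====
-- Pre_ excludes exactly day ≤ 0: there Python A never returns (unbounded recursion, RecursionError;
-- for day = 0 and w = [] a ValueError from max([])).
def Pre_get_min_capactity (day : Int) (w : List Int) : Prop := 1 ≤ day
instance (day : Int) (w : List Int) : Decidable (Pre_get_min_capactity day w) := by unfold Pre_get_min_capactity; infer_instance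
def pvWitness_get_min_capactity : Int × List Int := (2, [1, 2, 3])

def Spec_get_min_capactity (day : Int) (w : List Int) (out : Int) : Prop := out = get_min_capactity_alt day w
instance (day : Int) (w : List Int) (out : Int) : Decidable (Spec_get_min_capactity day w out) := by unfold Spec_get_min_capactity; infer_instance

-- ===== CLAIM (what is proved, stated in full; the proofs are below) =====
def Claim_equal_get_min_capactity : Prop := ∀ (day : Int) (w : List Int), Dom_get_min_capactity day w → Pre_get_min_capactity day w → Spec_get_min_capactity day w (get_min_capactity day w)

-- ===== LEMMAS AND PROOFS =====

-- the DP rows: dpRow w d = the row for d+1 days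
def dpRow (w : List Int) : Nat → List Int
  | 0 => (List.range (w.length + 1)).map (fun j => (w.drop j).sum)
  | k + 1 => bRow w (k + 2) (dpRow w k)

theorem foldl_range_dpRow (w : List Int) (m : Nat) :
    (List.range m).foldl (fun row k => bRow w (k + 2) row)
      ((List.range (w.length + 1)).map (fun j => (w.drop j).sum)) = dpRow w m := by
  induction m with
  | zero => rfl
  | succ k ih => rw [show List.range (k+1) = List.range k ++ [k] from List.range_succ, List.foldl_append, ih]; rfl

theorem A_unfold (day : Int) (w : List Int) (h1 : day ≠ 1) (h2 : (w.length : Int) ≠ day)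
    (hw : w ≠ []) :
    get_min_capactity day w =
      (PySem.List.pyRange 0 ((w.length : Int) - day + 1) 1).foldl
        (fun mc i =>
          min mc (max (PySem.List.slice w none (some (i + 1))).sum
                      (get_min_capactity (day - 1) (PySem.List.slice w (some (i + 1)) none))))
        w.sum := by
  rw [get_min_capactity]
  simp only [h1, h2, hw, if_false, dif_neg, not_false_iff]
  exact List.foldl_attach
    (f := fun mc i =>
      min mc (max (PySem.List.slice w none (some (i + 1))).sum
                  (get_min_capactity (day - 1) (PySem.List.slice w (some (i + 1)) none))))

theorem dpRow_key (w : List Int) (d : Nat) :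
    ∀ j : Nat, j ≤ w.length →
      (dpRow w d).getD j 0 = get_min_capactity ((d : Int) + 1) (w.drop j) := by
  induction d with
  | zero =>
    intro j hj
    rw [dpRow, get_min_capactity]
    simp only [List.getD_eq_getElem?_getD, List.getElem?_map]
    have : j < w.length + 1 := by omega
    simp [this]
  | succ d ih =>
    intro j hj
    rw [dpRow]
    have hget : (bRow w (d + 2) (dpRow w d)).getD j 0 = bCell w (d + 2) (dpRow w d) j := by
      simp only [bRow, List.getD_eq_getElem?_getD, List.getElem?_map]
      have : j < w.length + 1 := by omega
      simp [this]
    rw [hget, bCell]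
    set u := w.drop j with hu
    have hulen : u.length = w.length - j := by simp [hu]
    have hd1 : ((d + 1 : Nat) : Int) + 1 ≠ 1 := by push_cast; omega
    by_cases hm : w.length - j = d + 2
    · simp only [hm]
      rw [get_min_capactity]
      have hL : (u.length : Int) = ((d + 1 : Nat) : Int) + 1 := by rw [hulen, hm]; push_cast; ring
      rw [if_neg hd1, if_pos hL]
      simp
    · simp only [hm, if_false]
      have hlen2 : (u.length : Int) ≠ ((d + 1 : Nat) : Int) + 1 := by
        rw [hulen]; push_cast; omega
      by_cases hemp : u = []
      · have hm0 : w.length - j = 0 := by rw [← hulen, hemp]; rfl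
        rw [get_min_capactity, if_neg hd1, if_neg hlen2, dif_pos hemp]
        have hneg : ((w.length - j : Nat) : Int) - ((d + 2 : Nat) : Int) + 1 ≤ 0 := by
          rw [hm0]; push_cast; omega
        rw [Int.toNat_of_nonpos hneg]
        simp [hemp]
      · rw [A_unfold _ _ hd1 hlen2 hemp]
        have harg : (u.length : Int) - (((d + 1 : Nat) : Int) + 1) + 1
            = ((w.length - j : Nat) : Int) - ((d + 2 : Nat) : Int) + 1 := by
          rw [hulen]; push_cast; ring
        rw [harg]
        set c : Int := ((w.length - j : Nat) : Int) - ((d + 2 : Nat) : Int) + 1 with hc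
        rw [PySem.List.pyRange_one, List.foldl_map]
        have hczero : c - 0 = c := by ring
        rw [hczero]
        apply PySem.List.foldl_congr_mem
        intro best k hk
        have hkc : k < c.toNat := List.mem_range.1 hk
        have hk0 : (0 : Int) ≤ (k : Int) + 1 := by positivity
        have hzk : (0 : Int) + (k : Int) + 1 = (k : Int) + 1 := by ring
        rw [hzk, PySem.List.slice_to _ hk0, PySem.List.slice_from _ hk0]
        have htn : ((k : Int) + 1).toNat = k + 1 := by omega
        have hday1 : (((d + 1 : Nat) : Int) + 1) - 1 = ((d : Nat) : Int) + 1 := by push_cast; ring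
        rw [htn, hday1]
        have hdrop : u.drop (k + 1) = w.drop (j + (k + 1)) := by
          rw [hu, List.drop_drop]
        have hkcI : (k : Int) < c := by omega
        have hjk : j + (k + 1) ≤ w.length := by
          rw [hc] at hkcI
          push_cast at hkcI
          omega
        rw [hdrop, ← ih (j + (k + 1)) hjk]
        have hidx : j + k + 1 = j + (k + 1) := by omega
        rw [hidx]

-- ===== VERDICT (by name: the statement is the Claim_ definition above) =====
theorem get_min_capactity_spec : Claim_equal_get_min_capactity := by
  intro day w _ hpre
  unfold Spec_get_min_capactity get_min_capactity_alt
  by_cases h1 : day = 1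
  · rw [get_min_capactity]; simp [h1]
  · by_cases h2 : (w.length : Int) = day
    · rw [get_min_capactity]; simp [h1, h2]
    · by_cases h3 : day > (w.length : Int)
      · simp only [h1, if_false, h2, if_false, h3, if_pos]
        by_cases hw : w = []
        · rw [get_min_capactity, if_neg h1, if_neg h2, dif_pos hw]
        · rw [A_unfold day w h1 h2 hw]
          rw [PySem.List.pyRange_one_eq_nil (by omega)]
          rfl
      · simp only [h1, if_false, h2, if_false, h3, if_false]
        rw [foldl_range_dpRow w ((day - 1).toNat)]
        have hpre' : 1 ≤ day := hpre
        have hday2 : 2 ≤ day := by omega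
        have hcast : (((day - 1).toNat : Nat) : Int) + 1 = day := by omega
        have := dpRow_key w ((day - 1).toNat) 0 (by omega)
        rw [this, hcast, List.drop_zero]
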